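-- pv_equiv track=rewrite | github.com/pratheekdhananjaya/CS580_Project | Q4.py | solve
-- ===== SOURCE A (Python) =====
-- import collections
--
-- def solve(relations):
--     chain = [list(r) for r in relations]
--     numberOfRelations = len(chain)
--
--     for i in range(numberOfRelations - 2, -1, -1):
--         rightRelation = chain[i + 1]
--         validKeys = set(r[0] for r in rightRelation)
--
--         # Filter left relation
--         chain[i] = [r for r in chain[i] if r[1] in validKeys]
--
--     currentResult = chain[0]
--     for i in range(1, numberOfRelations):
--         nextRelation = chain[i]
--         idx = collections.defaultdict(list)
--         for r in nextRelation:
--             idx[r[0]].append(r)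
--
--         newResult = []
--         for tup in currentResult:
--             key = tup[-1]
--             if key in idx:
--                 for match in idx[key]:
--                     newResult.append(tup + (match[1],))
--         currentResult = newResult
--
--     return currentResult
-- ===== SOURCE B (Python) =====
-- def solve(relations):
--     # Depth-first join: index each later relation by first component once,
--     # then recursively extend each tuple of the first relation to full chains.
--     first = relations[0]
--     indexes = []
--     for rel in relations[1:]:
--         idx = {}
--         for r in rel:
--             idx.setdefault(r[0], []).append(r[1])
--         indexes.append(idx)
--
--     out = []
--
--     def dfs(tup, k):
--         if k == len(indexes):
--             out.append(tup)
--             return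
--         for v in indexes[k].get(tup[-1], ()):
--             dfs(tup + (v,), k + 1)
--
--     for t in first:
--         dfs(t, 0)
--     return out
-- ===== Notes on version B (the rewrite author's own statement) =====
-- stated objective: alternative
-- what changed: B replaces A's backward semijoin pruning pass plus iterative level-by-level materialisation of intermediate result lists with a single per-relation index build followed by a depth-first recursion that extends each starting tuple to a full chain; results and their order are identical.
import Mathlib
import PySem

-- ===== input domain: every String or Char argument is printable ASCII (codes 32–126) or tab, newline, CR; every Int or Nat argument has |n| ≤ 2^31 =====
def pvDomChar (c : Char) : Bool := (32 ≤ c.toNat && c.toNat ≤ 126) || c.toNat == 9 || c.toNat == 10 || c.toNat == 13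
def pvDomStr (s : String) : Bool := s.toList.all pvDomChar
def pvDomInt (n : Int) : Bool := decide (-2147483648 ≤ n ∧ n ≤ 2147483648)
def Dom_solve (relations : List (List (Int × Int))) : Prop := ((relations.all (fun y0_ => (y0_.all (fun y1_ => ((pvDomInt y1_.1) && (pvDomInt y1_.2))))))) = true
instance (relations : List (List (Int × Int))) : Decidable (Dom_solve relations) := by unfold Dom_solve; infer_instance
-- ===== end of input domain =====

-- B re-implements the chain join as a depth-first recursion over per-relation indexes and
-- drops A's backward semijoin pruning pass (objective: alternative; same results, same order).

-- ===== PORT A =====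
-- one step of the backward semijoin loop: chain[i] = [r for r in chain[i] if r[1] in validKeys]
def backStep (ch : List (List (Int × Int))) (i : Int) : List (List (Int × Int)) :=
  let rightRelation := PySem.List.pyGetD ch (i + 1) []
  let validKeys : PySem.Set Int := PySem.Set.ofList (rightRelation.map (fun r => r.1))
  ch.set i.toNat ((PySem.List.pyGetD ch i []).filter (fun r => PySem.Set.contains validKeys r.2))

-- one iteration of A's forward loop (build defaultdict index, extend every tuple)
def joinOnce (cur : List (List Int)) (nextRelation : List (Int × Int)) : List (List Int) :=
  let idx : PySem.Dict Int (List (Int × Int)) :=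
    nextRelation.foldl (fun d r => d.modify r.1 [] (fun l => l ++ [r])) PySem.Dict.empty
  cur.foldl
    (fun newResult tup =>
      let key := (PySem.List.pyGet? tup (-1)).getD 0   -- tup[-1]; tuples are never empty here
      if idx.contains key then
        (idx.getD key []).foldl (fun acc m => acc ++ [tup ++ [m.2]]) newResult
      else newResult)
    []

def solve (relations : List (List (Int × Int))) : List (List Int) :=
  let chain0 : List (List (Int × Int)) := relations.map (fun r => r)
  let numberOfRelations : Int := PySem.List.len chain0
  let chain := (PySem.List.pyRange (numberOfRelations - 2) (-1) (-1)).foldl backStep chain0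
  (PySem.List.pyRange 1 numberOfRelations 1).foldl
    (fun cur i => joinOnce cur (PySem.List.pyGetD chain i []))
    ((PySem.List.pyGetD chain 0 []).map (fun r => [r.1, r.2]))

-- ===== PORT B =====
-- recursive DFS: extend tup with every indexed continuation, emit when all indexes consumed
def solveDfs (idxs : List (PySem.Dict Int (List Int))) (tup : List Int) : List (List Int) :=
  match idxs with
  | [] => [tup]
  | d :: rest =>
      (d.getD ((PySem.List.pyGet? tup (-1)).getD 0) []).flatMap (fun v => solveDfs rest (tup ++ [v]))

def solve_alt (relations : List (List (Int × Int))) : List (List Int) :=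
  let first := PySem.List.pyGetD relations 0 []
  let indexes := (PySem.List.slice relations (some 1) none).map
    (fun rel => rel.foldl (fun d r => d.modify r.1 [] (fun l => l ++ [r.2])) PySem.Dict.empty)
  first.flatMap (fun t => solveDfs indexes [t.1, t.2])

-- ===== PRECONDITION & SPEC =====
-- Pre_ excludes only the empty relation list, on which both Pythons raise IndexError at relations[0].
def Pre_solve (relations : List (List (Int × Int))) : Prop := relations ≠ []
instance (relations : List (List (Int × Int))) : Decidable (Pre_solve relations) := by unfold Pre_solve; infer_instance
def pvWitness_solve : (List (List (Int × Int))) := [[(1, 2)], [(2, 3)]]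

def Spec_solve (relations : List (List (Int × Int))) (out : List (List Int)) : Prop := out = solve_alt relations
instance (relations : List (List (Int × Int))) (out : List (List Int)) : Decidable (Spec_solve relations out) := by unfold Spec_solve; infer_instance

-- ===== CLAIM (what is proved, stated in full; the proofs are below) =====
def Claim_equal_solve : Prop := ∀ (relations : List (List (Int × Int))), Dom_solve relations → Pre_solve relations → Spec_solve relations (solve relations)

-- ===== LEMMAS AND PROOFS =====

-- last element of a tuple, as both ports read it (tup[-1])
def lastI (t : List Int) : Int := (PySem.List.pyGet? t (-1)).getD 0

def pvMatches (rel : List (Int × Int)) (k : Int) : List (Int × Int) := rel.filter (fun r => r.1 == k)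

def pvStep (cur : List (List Int)) (rel : List (Int × Int)) : List (List Int) :=
  cur.flatMap (fun tup => (pvMatches rel (lastI tup)).map (fun r => tup ++ [r.2]))

def pvJ (cur : List (List Int)) (rels : List (List (Int × Int))) : List (List Int) :=
  rels.foldl pvStep cur

def pvDfs (tup : List Int) : List (List (Int × Int)) → List (List Int)
  | [] => [tup]
  | rel :: rest => (pvMatches rel (lastI tup)).flatMap (fun r => pvDfs (tup ++ [r.2]) rest)

def pvF (ch : List (List (Int × Int))) : List (List Int) :=
  pvJ ((ch.getD 0 []).map (fun r => [r.1, r.2])) (ch.drop 1)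

theorem lastI_append (t : List Int) (x : Int) : lastI (t ++ [x]) = x := by
  simp [lastI, PySem.List.pyGet?_neg_one_append_singleton]

theorem lastI_pair (x y : Int) : lastI [x, y] = y := by
  simp [lastI, PySem.List.pyGet?_neg_one]

theorem matches_nil (b : List (Int × Int)) (k : Int)
    (h : (b.map (fun r => r.1)).contains k = false) : pvMatches b k = [] := by
  have hk : k ∉ b.map (fun r => r.1) := by simpa using h
  unfold pvMatches
  rw [List.filter_eq_nil_iff]
  intro r hr
  simp only [beq_iff_eq]
  intro e
  exact hk (e ▸ List.mem_map_of_mem hr)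

theorem pvStep_cons (t : List Int) (l : List (List Int)) (b : List (Int × Int)) :
    pvStep (t :: l) b = (pvMatches b (lastI t)).map (fun r => t ++ [r.2]) ++ pvStep l b := rfl

theorem idxA_getD (rel : List (Int × Int)) (k : Int) :
    (rel.foldl (fun d r => d.modify r.1 [] (fun l => l ++ [r])) PySem.Dict.empty).getD k []
      = pvMatches rel k := by
  have h := PySem.Dict.getD_foldl_modify_append (l := rel.map (fun r => (r.1, r))) (d := PySem.Dict.empty) (c := k)
  rw [List.foldl_map] at h
  simpa [pvMatches, List.filter_map, Function.comp_def] using h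

theorem idxB_getD (rel : List (Int × Int)) (k : Int) :
    (rel.foldl (fun d r => d.modify r.1 [] (fun l => l ++ [r.2])) PySem.Dict.empty).getD k []
      = (pvMatches rel k).map (fun r => r.2) := by
  have h := PySem.Dict.getD_foldl_modify_append (l := rel) (d := PySem.Dict.empty) (c := k)
  simpa [pvMatches] using h

theorem joinOnce_eq_pvStep (cur : List (List Int)) (rel : List (Int × Int)) :
    joinOnce cur rel = pvStep cur rel := by
  unfold joinOnce pvStep
  rw [PySem.List.foldl_congr_mem
    (g := fun newResult tup => newResult ++ (pvMatches rel (lastI tup)).map (fun r => tup ++ [r.2]))]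
  · rw [PySem.List.foldl_append_eq_flatMap]; simp
  · intro acc tup _
    by_cases hc : (rel.foldl (fun d r => d.modify r.1 [] (fun l => l ++ [r])) PySem.Dict.empty).contains ((PySem.List.pyGet? tup (-1)).getD 0)
    · simp only [hc, if_pos, PySem.List.foldl_append_singleton_eq_map, idxA_getD, lastI]
    · have h0 : pvMatches rel (lastI tup) = [] := by
        rw [← idxA_getD, PySem.Dict.getD_of_not_contains]
        simpa [lastI] using hc
      simpa [hc, lastI] using h0.symm ▸ rfl

-- a tuple whose last element matches nothing in b contributes nothing to the next join step
theorem pvStep_filter_alive (ts : List (List Int)) (b : List (Int × Int)) :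
    pvStep (ts.filter (fun t => (b.map (fun r => r.1)).contains (lastI t))) b = pvStep ts b := by
  induction ts with
  | nil => rfl
  | cons t ts ih =>
    simp only [List.filter_cons]
    by_cases hc : (b.map (fun r => r.1)).contains (lastI t)
    · simp only [hc, if_pos]
      rw [pvStep_cons, pvStep_cons, ih]
    · have h0 := matches_nil b (lastI t) (by simpa using hc)
      simp only [hc]
      rw [if_neg (by simp), pvStep_cons, h0, ih]
      simp

theorem filter_flatMap' {α β : Type} (l : List α) (g : α → List β) (p : β → Bool) :
    (l.flatMap g).filter p = l.flatMap (fun x => (g x).filter p) := by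
  induction l with
  | nil => rfl
  | cons a l ih => simp [List.flatMap_cons, List.filter_append, ih]

theorem pvStep_filter_rel (cur : List (List Int)) (a : List (Int × Int)) (P : Int → Bool) :
    pvStep cur (a.filter (fun r => P r.2)) = (pvStep cur a).filter (fun t => P (lastI t)) := by
  unfold pvStep
  rw [filter_flatMap']
  refine congrArg (fun g => List.flatMap g cur) (funext fun tup => ?_)
  rw [List.filter_map]
  have h1 : ((fun t => P (lastI t)) ∘ fun r : Int × Int => tup ++ [r.2]) = fun r : Int × Int => P r.2 := by
    funext r; simp [lastI_append]
  rw [h1]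
  unfold pvMatches
  rw [List.filter_filter, List.filter_filter]
  exact congrArg (fun q => (a.filter q).map _) (funext fun r => by simp [Bool.and_comm])

theorem pvJ_cons (cur : List (List Int)) (rel : List (Int × Int)) (rest : List (List (Int × Int))) :
    pvJ cur (rel :: rest) = pvJ (pvStep cur rel) rest := rfl

theorem pvJ_set (rest : List (List (Int × Int))) : ∀ (cur : List (List Int)) (j : Nat),
    j + 1 < rest.length →
    pvJ cur (rest.set j ((rest.getD j []).filter
        (fun r => ((rest.getD (j+1) []).map (fun p => p.1)).contains r.2))) = pvJ cur rest := by
  induction rest with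
  | nil => intro cur j h; simp at h
  | cons a rest ih =>
    intro cur j h
    match j with
    | 0 =>
      match rest, h with
      | b :: v, _ =>
        simp only [List.set_cons_zero, List.getD_cons_zero, List.getD_cons_succ]
        rw [pvJ_cons, pvJ_cons, pvJ_cons, pvJ_cons]
        rw [pvStep_filter_rel cur a (fun x => (b.map (fun p => p.1)).contains x),
            pvStep_filter_alive]
    | j + 1 =>
      simp only [List.set_cons_succ, List.getD_cons_succ]
      rw [pvJ_cons, pvJ_cons]
      exact ih (pvStep cur a) j (by simpa using h)

theorem pvF_set (ch : List (List (Int × Int))) (j : Nat) (h : j + 1 < ch.length) :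
    pvF (ch.set j ((ch.getD j []).filter
        (fun r => ((ch.getD (j+1) []).map (fun p => p.1)).contains r.2))) = pvF ch := by
  match ch, j with
  | [], _ => simp at h
  | a :: rest, 0 =>
    match rest, h with
    | b :: v, _ =>
      simp only [List.set_cons_zero, List.getD_cons_zero, List.getD_cons_succ]
      unfold pvF
      simp only [List.getD_cons_zero, List.drop_one, List.tail_cons]
      have hmapfilter :
          (a.filter (fun r => ((b.map (fun p => p.1)).contains r.2))).map (fun r => [r.1, r.2])
            = (a.map (fun r => [r.1, r.2])).filter
                (fun t => (b.map (fun p => p.1)).contains (lastI t)) := by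
        rw [List.filter_map]
        exact congrArg (fun q => (a.filter q).map _) (funext fun r => by simp [lastI_pair])
      rw [hmapfilter, pvJ_cons, pvJ_cons, pvStep_filter_alive]
  | a :: rest, j + 1 =>
    unfold pvF
    simp only [List.set_cons_succ, List.getD_cons_zero, List.getD_cons_succ, List.drop_one,
      List.tail_cons]
    exact pvJ_set rest _ j (by simpa using h)

theorem backStep_eq_set (ch : List (List (Int × Int))) (i : Int) (h0 : 0 ≤ i) :
    backStep ch i = ch.set i.toNat ((ch.getD i.toNat []).filter
        (fun r => ((ch.getD (i.toNat + 1) []).map (fun p => p.1)).contains r.2)) := by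
  unfold backStep
  have hi : i = ((i.toNat : Nat) : Int) := by omega
  have hgi : PySem.List.pyGetD ch i [] = ch.getD i.toNat [] := by
    rw [hi, PySem.List.pyGetD_natCast, Int.toNat_natCast]
  have hgi1 : PySem.List.pyGetD ch (i + 1) [] = ch.getD (i.toNat + 1) [] := by
    rw [show i + 1 = (((i.toNat + 1 : Nat)) : Int) by omega, PySem.List.pyGetD_natCast]
  rw [hgi, hgi1]
  refine congrArg (fun q => ch.set i.toNat ((ch.getD i.toNat []).filter q)) (funext fun r => ?_)
  -- membership in set(...) is membership in the underlying key list
  simp [PySem.Set.contains, PySem.Set.mem_ofList]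

theorem back_fold (L : List Int) : ∀ ch : List (List (Int × Int)),
    (∀ i ∈ L, 0 ≤ i ∧ i + 1 < (ch.length : Int)) →
    (L.foldl backStep ch).length = ch.length ∧ pvF (L.foldl backStep ch) = pvF ch := by
  induction L with
  | nil => intro ch _; exact ⟨rfl, rfl⟩
  | cons i L ih =>
    intro ch hb
    obtain ⟨h0, h1⟩ := hb i (List.mem_cons_self ..)
    have hset := backStep_eq_set ch i h0
    have hlen : (backStep ch i).length = ch.length := by rw [hset]; exact List.length_set ..
    have hb' : ∀ x ∈ L, 0 ≤ x ∧ x + 1 < ((backStep ch i).length : Int) := by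
      intro x hx; rw [hlen]; exact hb x (List.mem_cons_of_mem _ hx)
    obtain ⟨ihlen, ihF⟩ := ih (backStep ch i) hb'
    constructor
    · simpa [hlen] using ihlen
    · rw [List.foldl_cons] at *
      rw [ihF, hset, pvF_set ch i.toNat (by omega)]

theorem pvJ_eq_dfs (rels : List (List (Int × Int))) : ∀ cur : List (List Int),
    pvJ cur rels = cur.flatMap (fun tup => pvDfs tup rels) := by
  induction rels with
  | nil => intro cur; simp [pvJ, pvDfs]
  | cons rel rest ih =>
    intro cur
    rw [pvJ_cons, ih]
    unfold pvStep
    rw [List.flatMap_assoc]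
    refine congrArg (fun g => List.flatMap g cur) (funext fun tup => ?_)
    rw [List.flatMap_map]
    rfl

theorem dfs_eq (rels : List (List (Int × Int))) : ∀ tup : List Int,
    pvDfs tup rels
      = solveDfs (rels.map (fun rel =>
          rel.foldl (fun d r => d.modify r.1 [] (fun l => l ++ [r.2])) PySem.Dict.empty)) tup := by
  induction rels with
  | nil => intro tup; rfl
  | cons rel rest ih =>
    intro tup
    show pvDfs tup (rel :: rest) = _
    simp only [List.map_cons, solveDfs, idxB_getD]
    rw [List.flatMap_map]
    unfold pvDfs
    exact congrArg (fun g => List.flatMap g _) (funext fun r => by rw [ih])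

theorem solve_eq_pvF (relations : List (List (Int × Int))) : solve relations = pvF relations := by
  unfold solve
  simp only [List.map_id']
  set n : Int := PySem.List.len relations with hn
  set chain := (PySem.List.pyRange (n - 2) (-1) (-1)).foldl backStep relations with hchain
  have hb : ∀ i ∈ PySem.List.pyRange (n - 2) (-1) (-1), 0 ≤ i ∧ i + 1 < (relations.length : Int) := by
    intro i hi
    rw [PySem.List.mem_pyRange_neg_one] at hi
    have : n = (relations.length : Int) := by simp [hn, PySem.List.len]
    omega
  obtain ⟨hlen, hF⟩ := back_fold (PySem.List.pyRange (n - 2) (-1) (-1)) relations hb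
  have hnc : n = PySem.List.len chain := by
    simp only [hn, hchain, PySem.List.len]
    exact_mod_cast hlen.symm
  rw [hnc]
  refine Eq.trans (PySem.List.foldl_pyRange_pyGetD chain [] joinOnce _ (by norm_num)) ?_
  have hstep : joinOnce = pvStep := funext fun cur => funext fun rel => joinOnce_eq_pvStep cur rel
  rw [hstep, PySem.List.pyGetD_zero]
  show pvF chain = pvF relations
  exact hF

theorem solve_alt_eq_pvF (relations : List (List (Int × Int))) : solve_alt relations = pvF relations := by
  unfold solve_alt pvF
  rw [PySem.List.slice_from_one, PySem.List.pyGetD_zero, pvJ_eq_dfs, List.flatMap_map]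
  refine congrArg (fun g => List.flatMap g _) (funext fun t => ?_)
  rw [dfs_eq, List.drop_one]

-- ===== VERDICT (by name: the statement is the Claim_ definition above) =====
theorem solve_spec : Claim_equal_solve := by
  intro relations _ _
  unfold Spec_solve
  rw [solve_eq_pvF, solve_alt_eq_pvF]
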